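-- pv_equiv track=rewrite | github.com/amirdnc/phrase_similarity | infrence/phrase_similarity.py | get_gold
-- ===== SOURCE A (Python) =====
-- from collections import defaultdict
--
-- def get_gold(data):
--     d = defaultdict(list)
--     for word, similar in zip(data['word'], data['choose']):
--         d[word.replace('_', ' ')].append(similar.replace('_', ' '))
--     l = list(d.items())
--     for k, v in l:
--         if v.count('0') + v.count('1') >=3:
--             del d[k]
--     return d
-- ===== SOURCE B (Python) =====
-- from collections import defaultdict
--
-- def get_gold(data):
--     pairs = [(w.replace('_', ' '), s.replace('_', ' '))
--              for w, s in zip(data['word'], data['choose'])]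
--     keys = list(dict.fromkeys(k for k, _ in pairs))
--     out = defaultdict(list)
--     for k in keys:
--         vals = [v for kk, v in pairs if kk == k]
--         if vals.count('0') + vals.count('1') < 3:
--             out[k] = vals
--     return out
-- ===== Notes on version B (the rewrite author's own statement) =====
-- stated objective: alternative
-- what changed: Instead of A's incremental defaultdict grouping followed by a count-and-delete pass over the built dict, B materializes the transformed pair list once, dedupes the keys in first-occurrence order, and for each distinct key gathers its values by a fresh comprehension scan, inserting only the keys whose gathered list has fewer than three '0'/'1' entries.
import Mathlib
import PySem

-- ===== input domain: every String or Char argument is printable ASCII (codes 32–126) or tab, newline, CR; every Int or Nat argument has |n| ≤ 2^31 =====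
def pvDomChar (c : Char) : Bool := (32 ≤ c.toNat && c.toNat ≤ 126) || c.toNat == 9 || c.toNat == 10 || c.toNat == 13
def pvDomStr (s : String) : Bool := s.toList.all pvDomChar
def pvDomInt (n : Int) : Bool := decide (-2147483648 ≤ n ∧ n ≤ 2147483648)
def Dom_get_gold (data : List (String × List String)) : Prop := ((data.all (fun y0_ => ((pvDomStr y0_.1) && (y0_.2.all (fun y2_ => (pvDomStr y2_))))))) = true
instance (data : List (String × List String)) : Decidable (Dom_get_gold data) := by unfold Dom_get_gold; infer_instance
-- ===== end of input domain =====

-- B replaces A's incremental dict grouping + delete pass by a dedup of the keys and a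
-- per-key gathering scan of the flat pair list; equal return value, not faster.

-- ===== PORT A =====
def get_gold (data : List (String × List String)) : List (String × List String) :=
  let dd := PySem.Dict.ofList data
  match dd.get? "word", dd.get? "choose" with
  | some words, some chooses =>
    let d := (words.zip chooses).foldl
      (fun d p => d.modify (PySem.Str.replace p.1 "_" " ") []
        (fun v => v ++ [PySem.Str.replace p.2 "_" " "])) PySem.Dict.empty
    let l := d.items
    (l.foldl (fun d p =>
      if 3 ≤ PySem.List.count p.2 "0" + PySem.List.count p.2 "1" then d.erase p.1 else d) d).items
  | _, _ => []  -- unreachable under Pre_get_gold (Python raises KeyError)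

-- ===== PORT B =====
def get_gold_alt (data : List (String × List String)) : List (String × List String) :=
  let dd := PySem.Dict.ofList data
  match dd.get? "word" with
  | none => []  -- unreachable under Pre_get_gold (Python raises KeyError)
  | some words =>
  match dd.get? "choose" with
  | none => []  -- unreachable under Pre_get_gold
  | some chooses =>
    let pairs := (words.zip chooses).map
      (fun p => (PySem.Str.replace p.1 "_" " ", PySem.Str.replace p.2 "_" " "))
    let keys := PySem.List.dedup (pairs.map Prod.fst)
    (keys.foldl (fun out k =>
        let vals := (pairs.filter (fun q => q.1 == k)).map Prod.snd
        if PySem.List.count vals "0" + PySem.List.count vals "1" < 3 then out.insert k vals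
        else out)
      (PySem.Dict.empty : PySem.Dict String (List String))).items

-- ===== PRECONDITION & SPEC =====
-- Pre_ excludes exactly the inputs whose dict lacks a "word" or a "choose" key, on which
-- the Python A (and B) raises KeyError.
def Pre_get_gold (data : List (String × List String)) : Prop :=
  ((PySem.Dict.ofList data).get? "word").isSome = true ∧
  ((PySem.Dict.ofList data).get? "choose").isSome = true
instance (data : List (String × List String)) : Decidable (Pre_get_gold data) := by
  unfold Pre_get_gold; infer_instance
def pvWitness_get_gold : (List (String × List String)) :=
  [("word", ["a_b", "c"]), ("choose", ["0", "x_y"])]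
def Spec_get_gold (data : List (String × List String)) (out : List (String × List String)) : Prop := out = get_gold_alt data
instance (data : List (String × List String)) (out : List (String × List String)) : Decidable (Spec_get_gold data out) := by unfold Spec_get_gold; infer_instance

-- ===== CLAIM =====
def Claim_equal_get_gold : Prop := ∀ (data : List (String × List String)), Dom_get_gold data → Pre_get_gold data → Spec_get_gold data (get_gold data)

-- ===== LEMMAS AND PROOFS =====

-- A's delete loop over a pair list, as a filter on the items of the dict it edits.
theorem pv_eraseFold (l : List (String × List String)) (e : PySem.Dict String (List String)) :
    (l.foldl (fun d p =>
      if 3 ≤ PySem.List.count p.2 "0" + PySem.List.count p.2 "1" then d.erase p.1 else d) e).items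
    = e.items.filter (fun q => l.all (fun p =>
        !(decide (3 ≤ PySem.List.count p.2 "0" + PySem.List.count p.2 "1")) || (q.1 != p.1))) := by
  induction l generalizing e with
  | nil => simp
  | cons p l ih =>
    by_cases hp : 3 ≤ PySem.List.count p.2 "0" + PySem.List.count p.2 "1"
    · rw [List.foldl_cons, if_pos hp, ih]
      simp only [PySem.Dict.erase, List.filter_filter]
      refine List.filter_congr (fun q _ => ?_)
      have hp' : 3 ≤ List.count "0" p.2 + List.count "1" p.2 := by
        simpa [PySem.List.count] using hp
      simp [hp', List.all_cons, Bool.and_comm, bne]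
    · rw [List.foldl_cons, if_neg hp, ih]
      refine (List.filter_congr (fun q _ => ?_)).symm
      have hp' : List.count "0" p.2 + List.count "1" p.2 < 3 := by
        simpa [PySem.List.count] using Nat.lt_of_not_le hp
      simp [hp', List.all_cons]

-- With nodup keys, the "no bad pair shares my key" test collapses to the pair's own test.
theorem pv_all_key (d : PySem.Dict String (List String)) (hnd : d.keys.Nodup)
    (q : String × List String) (hq : q ∈ d.items) (f : String × List String → Bool) :
    d.items.all (fun p => f p || (q.1 != p.1)) = f q := by
  have huniq : ∀ p ∈ d.items, p.1 = q.1 → p = q := by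
    intro p hp hkey
    have h1 : d.getD q.1 [] = q.2 := PySem.Dict.getD_of_mem_items d hq hnd []
    have h2 : d.getD p.1 [] = p.2 := PySem.Dict.getD_of_mem_items d hp hnd []
    rw [hkey, h1] at h2
    exact Prod.ext hkey h2.symm
  rcases hf : f q with _ | _
  · simp only [List.all_eq_false]
    exact ⟨q, hq, by simp [hf]⟩
  · simp only [List.all_eq_true]
    intro p hp
    by_cases hkey : p.1 = q.1
    · rw [huniq p hp hkey, hf]; simp
    · simp [bne, Ne.symm hkey]

-- B's conditional insert loop filters first, then inserts.
theorem pv_insFold (cond : String → Bool) (val : String → List String) (l : List String)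
    (out : PySem.Dict String (List String)) :
    l.foldl (fun out k => if cond k then out.insert k (val k) else out) out
    = (l.filter cond).foldl (fun out k => out.insert k (val k)) out := by
  induction l generalizing out with
  | nil => rfl
  | cons k l ih =>
    by_cases h : cond k <;> simp [h, ih]

-- ===== VERDICT (by name: the statement is the Claim_ definition above) =====
set_option maxHeartbeats 1000000 in
theorem get_gold_spec : Claim_equal_get_gold := by
  intro data _ hpre
  obtain ⟨hw, hc⟩ := hpre
  unfold Spec_get_gold get_gold get_gold_alt
  obtain ⟨words, hws⟩ := Option.isSome_iff_exists.mp hw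
  obtain ⟨chooses, hcs⟩ := Option.isSome_iff_exists.mp hc
  simp only [hws, hcs]
  set L := words.zip chooses with hL
  set M := L.map (fun p => (PySem.Str.replace p.1 "_" " ", PySem.Str.replace p.2 "_" " ")) with hM
  set d := L.foldl (fun d p => d.modify (PySem.Str.replace p.1 "_" " ") []
      (fun v => v ++ [PySem.Str.replace p.2 "_" " "])) PySem.Dict.empty with hd
  have hdM : d = M.foldl (fun d p => d.modify p.1 [] (fun v => v ++ [p.2])) PySem.Dict.empty := by
    rw [hM, List.foldl_map]
  clear_value L M d
  -- shared per-key value list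
  set vals : String → List String := fun k => (M.filter (fun q => q.1 == k)).map Prod.snd with hvals
  set cond : String → Bool := fun k =>
    decide (PySem.List.count (vals k) "0" + PySem.List.count (vals k) "1" < 3) with hcond
  have hnd : d.keys.Nodup := by
    rw [hdM]
    exact PySem.Dict.nodup_keys_foldl_modify_key M Prod.fst [] (fun _ p v => v ++ [p.2])
      PySem.Dict.empty (by simp)
  have hkeys : d.keys = PySem.List.dedup (M.map Prod.fst) := by
    rw [hdM, PySem.Dict.keys_foldl_modify_key M Prod.fst [] (fun _ p v => v ++ [p.2])]
    rw [PySem.Dict.keys_empty, PySem.Set.update_nil_left]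
    simp
  have hval : ∀ k, d.getD k [] = vals k := by
    intro k
    rw [hdM, PySem.Dict.getD_foldl_modify_append]
    simp [hvals]
  -- A's pre-delete items, keyed
  have hitems : d.items = d.keys.map (fun k => (k, vals k)) := by
    rw [PySem.Dict.items_eq_map_keys d hnd []]
    exact List.map_congr_left (fun k _ => by rw [hval k])
  -- A side: delete loop = filter by the pair's own test
  rw [pv_eraseFold]
  have hA : d.items.filter (fun q => d.items.all (fun p =>
        !(decide (3 ≤ PySem.List.count p.2 "0" + PySem.List.count p.2 "1")) || (q.1 != p.1)))
      = d.items.filter (fun q => cond q.1) := by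
    refine List.filter_congr (fun q hq => ?_)
    rw [pv_all_key d hnd q hq]
    have hq2 : q.2 = vals q.1 := by
      rw [← hval q.1, PySem.Dict.getD_of_mem_items d hq hnd []]
    rw [hq2, hcond]
    simp [← decide_not]
  rw [hA, hitems, hkeys]
  -- both sides are now maps over the deduped key list
  rw [List.filter_map]
  -- B side: conditional insert fold over the deduped keys
  rw [show (fun (out : PySem.Dict String (List String)) k =>
        if PySem.List.count ((M.filter (fun q => q.1 == k)).map Prod.snd) "0"
           + PySem.List.count ((M.filter (fun q => q.1 == k)).map Prod.snd) "1" < 3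
        then out.insert k ((M.filter (fun q => q.1 == k)).map Prod.snd) else out)
      = (fun out k => if cond k then out.insert k (vals k) else out) from by
        funext out k
        rw [hcond, hvals]
        by_cases h : PySem.List.count ((M.filter (fun q => q.1 == k)).map Prod.snd) "0"
           + PySem.List.count ((M.filter (fun q => q.1 == k)).map Prod.snd) "1" < 3 <;>
          simp [h]]
  rw [pv_insFold]
  have hsub : ((PySem.List.dedup (M.map Prod.fst)).filter cond).Nodup :=
    (PySem.List.nodup_dedup _).filter _
  have hfresh : ∀ a ∈ (PySem.List.dedup (M.map Prod.fst)).filter cond,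
      (PySem.Dict.empty : PySem.Dict String (List String)).contains (id a) = false :=
    fun a _ => by simp
  have := PySem.Dict.items_foldl_insert_fresh
      ((PySem.List.dedup (M.map Prod.fst)).filter cond) id vals PySem.Dict.empty hfresh
      (by simpa using hsub)
  simp only [id] at this
  rw [this, show (PySem.Dict.empty : PySem.Dict String (List String)).items = [] from rfl,
    List.nil_append]
  exact (List.map_congr_left (fun k _ => rfl)).symm
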